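-- pv_equiv track=rewrite | github.com/MrNameless10/LA-ll | Treino 02/viagem.py | build
-- ===== SOURCE A (Python) =====
-- def build(rotas):
--    adj = {}
--
--
--    for lista in rotas:
--        cont = 0
--        while (cont < len(lista)):
--          if lista[cont] not in adj:
--            adj[lista[cont]] = {}
--          if (cont +2) < len(lista):
--            if lista[cont+2] not in adj:
--              adj[lista[cont+2]] = {}
--          else:
--             break
--          adj[lista[cont]][lista[cont+2]]= lista[cont+1]
--          adj[lista[cont+2]][lista[cont]]= lista[cont+1]
--          cont+=2
--
--    return adj
-- ===== SOURCE B (Python) =====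
-- def build(rotas):
--     # collect-then-build: flatten all routes into a global node list and a global
--     # edge-triple list, then construct the adjacency dict in two bulk steps
--     nodes = []
--     edges = []
--     for lista in rotas:
--         it = iter(lista)
--         cl = list(zip(it, it))              # (node, weight) chunks of two
--         heads = [n for n, _ in cl]
--         if len(lista) % 2:
--             heads.append(lista[-1])         # lone trailing node
--         nodes += heads
--         edges += list(zip(heads, heads[1:], (w for _, w in cl)))
--     adj = {x: {} for x in nodes}
--     for a, c, w in edges:
--         adj[a][c] = w
--         adj[c][a] = w
--     return adj
-- ===== Notes on version B (the rewrite author's own statement) =====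
-- stated objective: alternative
-- what changed: Replaces A's incremental per-list while-loop that mutates the dict as it scans by a collect-then-build scheme: first flatten all routes into a global node list (pairwise iterator chunking via zip(it, it)) and a global edge-triple list (zip of heads, shifted heads and weights), then build the whole dict in two bulk steps (a dict comprehension for the nodes, one loop for the edges).
import Mathlib
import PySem

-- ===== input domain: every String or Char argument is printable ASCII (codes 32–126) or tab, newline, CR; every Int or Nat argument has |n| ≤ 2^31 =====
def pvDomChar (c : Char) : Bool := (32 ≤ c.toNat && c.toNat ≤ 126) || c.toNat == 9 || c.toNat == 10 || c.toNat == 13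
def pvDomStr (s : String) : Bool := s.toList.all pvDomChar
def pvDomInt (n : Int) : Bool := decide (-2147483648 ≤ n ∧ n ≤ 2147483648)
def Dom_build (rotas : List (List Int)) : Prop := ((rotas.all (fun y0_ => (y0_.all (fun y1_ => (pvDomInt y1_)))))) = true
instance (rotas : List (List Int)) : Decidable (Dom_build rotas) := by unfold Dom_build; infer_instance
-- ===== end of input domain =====

-- B replaces A's incremental per-list while-loop (mutating the dict as it scans)
-- by a collect-then-build scheme: flatten all routes into a global node list and a
-- global edge-triple list, then build the dict in two bulk steps: alternative.

-- ===== PORT A =====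
-- 'if lista[cont] not in adj: adj[lista[cont]] = {}'
def reg1 (adj : PySem.Dict Int (PySem.Dict Int Int)) (a : Int) :
    PySem.Dict Int (PySem.Dict Int Int) :=
  if adj.contains a then adj else adj.insert a PySem.Dict.empty

-- A's while-loop: register lista[cont]; if cont+2 is in range, register lista[cont+2],
-- write both edge directions (adj[a][c] = adj[c][a] = lista[cont+1]) and continue, else break.
def buildLoopA (lista : List Int) (adj : PySem.Dict Int (PySem.Dict Int Int)) (cont : Nat) :
    PySem.Dict Int (PySem.Dict Int Int) :=
  if h : cont < lista.length then
    if h2 : cont + 2 < lista.length then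
      buildLoopA lista
        (((reg1 (reg1 adj (lista.getD cont 0)) (lista.getD (cont + 2) 0)).modify
            (lista.getD cont 0) PySem.Dict.empty
            (fun inner => inner.insert (lista.getD (cont + 2) 0) (lista.getD (cont + 1) 0))).modify
          (lista.getD (cont + 2) 0) PySem.Dict.empty
          (fun inner => inner.insert (lista.getD cont 0) (lista.getD (cont + 1) 0)))
        (cont + 2)
    else reg1 adj (lista.getD cont 0)  -- register lista[cont], then break
  else adj
termination_by lista.length - cont

def build (rotas : List (List Int)) : List (Int × List (Int × Int)) :=
  (rotas.foldl (fun adj lista => buildLoopA lista adj 0) PySem.Dict.empty).items.map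
    (fun p => (p.1, p.2.items))

-- ===== PORT B =====
-- 'list(zip(it, it))' on the list's iterator: consume two elements per chunk (exact
-- hand port of zip over one shared iterator; a trailing lone element is dropped).
def chunk2 : List Int → List (Int × Int)
  | a :: b :: t => (a, b) :: chunk2 t
  | _ => []

-- 'zip(heads, heads[1:], weights)': Python's three-way zip, truncating to the shortest.
def zip3I : List Int → List Int → List Int → List (Int × Int × Int)
  | a :: as_, b :: bs, c :: cs => (a, b, c) :: zip3I as_ bs cs
  | _, _, _ => []

-- heads = [n for n, _ in cl]; if len(lista) % 2: heads.append(lista[-1])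
def headsOf (lista : List Int) : List Int :=
  (chunk2 lista).map Prod.fst ++
    (if lista.length % 2 == 1 then [PySem.List.pyGetD lista (-1) 0] else [])

def build_alt (rotas : List (List Int)) : List (Int × List (Int × Int)) :=
  -- the collecting loop: nodes += heads; edges += list(zip(heads, heads[1:], weights))
  let st := rotas.foldl
    (fun (st : List Int × List (Int × Int × Int)) lista =>
      let heads := headsOf lista
      (st.1 ++ heads,
       st.2 ++ zip3I heads (PySem.List.slice heads (some 1) none) ((chunk2 lista).map Prod.snd)))
    ([], [])
  -- adj = {x: {} for x in nodes}
  let adj0 := st.1.foldl (fun d x => d.insert x PySem.Dict.empty) PySem.Dict.empty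
  -- for a, c, w in edges: adj[a][c] = w; adj[c][a] = w
  let adj := st.2.foldl
    (fun d t =>
      (d.modify t.1 PySem.Dict.empty (fun inner => inner.insert t.2.1 t.2.2)).modify
        t.2.1 PySem.Dict.empty (fun inner => inner.insert t.1 t.2.2))
    adj0
  adj.items.map (fun p => (p.1, p.2.items))

-- ===== PRECONDITION & SPEC =====
def Spec_build (rotas : List (List Int)) (out : List (Int × List (Int × Int))) : Prop := out = build_alt rotas
instance (rotas : List (List Int)) (out : List (Int × List (Int × Int))) : Decidable (Spec_build rotas out) := by unfold Spec_build; infer_instance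

-- ===== CLAIM (what is proved, stated in full; the proofs are below) =====
def Claim_equal_build : Prop := ∀ (rotas : List (List Int)), Dom_build rotas → Spec_build rotas (build rotas)

-- ===== LEMMAS AND PROOFS =====

-- spec-level helpers: A's interleaved loop split into two index-based passes
def regFrom (lista : List Int) (adj : PySem.Dict Int (PySem.Dict Int Int)) (j : Nat) :
    PySem.Dict Int (PySem.Dict Int Int) :=
  if h : j < lista.length then
    regFrom lista (adj.setdefault (lista.getD j 0) PySem.Dict.empty) (j + 2)
  else adj
termination_by lista.length - j

def edges (a c w : Int) (d : PySem.Dict Int (PySem.Dict Int Int)) :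
    PySem.Dict Int (PySem.Dict Int Int) :=
  (d.modify a PySem.Dict.empty (fun inner => inner.insert c w)).modify c
    PySem.Dict.empty (fun inner => inner.insert a w)

def edgeFrom (lista : List Int) (adj : PySem.Dict Int (PySem.Dict Int Int)) (j : Nat) :
    PySem.Dict Int (PySem.Dict Int Int) :=
  if h : j + 2 < lista.length then
    edgeFrom lista (edges (lista.getD j 0) (lista.getD (j + 2) 0) (lista.getD (j + 1) 0) adj) (j + 2)
  else adj
termination_by lista.length - j

-- list-level passes: register a list of nodes / write a list of edge triples
def regF (ns : List Int) (d : PySem.Dict Int (PySem.Dict Int Int)) :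
    PySem.Dict Int (PySem.Dict Int Int) :=
  ns.foldl (fun d x => d.setdefault x PySem.Dict.empty) d

def edgF (es : List (Int × Int × Int)) (d : PySem.Dict Int (PySem.Dict Int Int)) :
    PySem.Dict Int (PySem.Dict Int Int) :=
  es.foldl (fun d t => edges t.1 t.2.1 t.2.2 d) d

-- the even-indexed elements / the edge triples of one list, structurally
def evens : List Int → List Int
  | a :: _ :: t => a :: evens t
  | [a] => [a]
  | [] => []

def etrips : List Int → List (Int × Int × Int)
  | a :: w :: c :: t => (a, c, w) :: etrips (c :: t)
  | _ => []

theorem contains_setdefault (d : PySem.Dict Int (PySem.Dict Int Int)) (k x : Int) (v : PySem.Dict Int Int) :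
    (d.setdefault k v).contains x = (d.contains x || x == k) := by
  by_cases h : d.contains k = true
  · rw [PySem.Dict.setdefault_of_contains (h := h)]
    by_cases hx : x = k <;> simp_all
  · rw [PySem.Dict.setdefault_of_not_contains (h := by simp_all),
      PySem.Dict.contains_insert, Bool.or_comm]

theorem contains_edges (a c w x : Int) (d : PySem.Dict Int (PySem.Dict Int Int)) :
    (edges a c w d).contains x = (x == c || (x == a || d.contains x)) := by
  simp [edges, PySem.Dict.contains_modify]

theorem getD_append_single_ne (d : PySem.Dict Int (PySem.Dict Int Int)) (k a : Int)
    (e x : PySem.Dict Int Int) (hne : ¬ (a == k) = true) :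
    (PySem.Dict.mk (d.items ++ [(k, e)])).getD a x = d.getD a x := by
  have hka : ¬ k = a := fun h => hne (by simp [h])
  simp [PySem.Dict.getD, PySem.Dict.get?, List.find?_append]
  cases hf : d.items.find? (fun p => p.1 == a) <;> simp [hka]

theorem insert_append_single (d : PySem.Dict Int (PySem.Dict Int Int)) (k a : Int)
    (e w : PySem.Dict Int Int) (ha : d.contains a = true) (hne : ¬ (a == k) = true) :
    (PySem.Dict.mk (d.items ++ [(k, e)])).insert a w =
      PySem.Dict.mk ((d.insert a w).items ++ [(k, e)]) := by
  have hka : ¬ k = a := fun h => hne (by simp [h])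
  have hc : (PySem.Dict.mk (d.items ++ [(k, e)])).contains a = true := by
    simp only [PySem.Dict.contains, List.any_append, Bool.or_eq_true]
    exact Or.inl ha
  rw [PySem.Dict.insert, if_pos hc, PySem.Dict.insert, if_pos ha]
  simp [hka]

theorem modify_append_single (d : PySem.Dict Int (PySem.Dict Int Int)) (k a : Int)
    (e : PySem.Dict Int Int) (f : PySem.Dict Int Int → PySem.Dict Int Int)
    (ha : d.contains a = true) (hne : ¬ (a == k) = true) :
    (PySem.Dict.mk (d.items ++ [(k, e)])).modify a PySem.Dict.empty f =
      PySem.Dict.mk ((d.modify a PySem.Dict.empty f).items ++ [(k, e)]) := by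
  rw [PySem.Dict.modify, PySem.Dict.modify, getD_append_single_ne d k a e _ hne,
    insert_append_single d k a e _ ha hne]

-- writing an edge between two present nodes commutes with registering any node
theorem edges_setdefault (a c w k : Int) (d : PySem.Dict Int (PySem.Dict Int Int))
    (ha : d.contains a = true) (hc : d.contains c = true) :
    edges a c w (d.setdefault k PySem.Dict.empty) =
      (edges a c w d).setdefault k PySem.Dict.empty := by
  by_cases hk : d.contains k = true
  · rw [PySem.Dict.setdefault_of_contains (h := hk),
      PySem.Dict.setdefault_of_contains (h := by simp [contains_edges, hk])]
  · have hak' : ¬ a = k := fun h => hk (h ▸ ha)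
    have hck' : ¬ c = k := fun h => hk (h ▸ hc)
    have hak : ¬ (a == k) = true := by simpa using hak'
    have hck : ¬ (c == k) = true := by simpa using hck'
    rw [PySem.Dict.setdefault_of_not_contains (h := by simp_all),
      PySem.Dict.setdefault_of_not_contains
        (h := by simp [contains_edges]; exact ⟨fun h => hck' h.symm, fun h => hak' h.symm, by simp_all⟩)]
    rw [PySem.Dict.insert, if_neg (by simp_all), PySem.Dict.insert,
      if_neg (by simp [contains_edges]; exact ⟨fun h => hck' h.symm, fun h => hak' h.symm, by simp_all⟩)]
    have hca : (d.modify a PySem.Dict.empty (fun inner => inner.insert c w)).contains c = true := by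
      simp [PySem.Dict.contains_modify, hc]
    rw [edges, edges, modify_append_single d k a _ _ ha hak, modify_append_single _ k c _ _ hca hck]

theorem contains_regF (ns : List Int) (d : PySem.Dict Int (PySem.Dict Int Int)) (x : Int) :
    (regF ns d).contains x = (d.contains x || ns.contains x) := by
  induction ns generalizing d with
  | nil => simp [regF]
  | cons n t ih =>
    simp only [regF, List.foldl_cons] at *
    rw [ih, contains_setdefault]
    by_cases hx : x = n
    · simp [hx]
    · have hb : (x == n) = false := by simp [hx]
      simp [hb, hx]

theorem ite_contains_insert (d : PySem.Dict Int (PySem.Dict Int Int)) (a : Int) :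
    (if d.contains a then d else d.insert a PySem.Dict.empty) = d.setdefault a PySem.Dict.empty := by
  by_cases h : d.contains a = true
  · rw [if_pos h, PySem.Dict.setdefault_of_contains (h := h)]
  · rw [if_neg (by simp_all), PySem.Dict.setdefault_of_not_contains (h := by simp_all)]

-- an edge between present nodes commutes with a whole register pass
theorem edges_regF (ns : List Int) (a c w : Int) (d : PySem.Dict Int (PySem.Dict Int Int))
    (ha : d.contains a = true) (hc : d.contains c = true) :
    edges a c w (regF ns d) = regF ns (edges a c w d) := by
  induction ns generalizing d with
  | nil => rfl
  | cons n t ih =>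
    simp only [regF, List.foldl_cons] at *
    rw [← edges_setdefault _ _ _ _ _ ha hc]
    exact ih _ (by simp [contains_setdefault, ha]) (by simp [contains_setdefault, hc])

-- a whole edge pass commutes with a whole register pass when all endpoints are present
theorem edgF_regF (es : List (Int × Int × Int)) (ns : List Int)
    (d : PySem.Dict Int (PySem.Dict Int Int))
    (hp : ∀ t ∈ es, d.contains t.1 = true ∧ d.contains t.2.1 = true) :
    edgF es (regF ns d) = regF ns (edgF es d) := by
  induction es generalizing d with
  | nil => rfl
  | cons e t ih =>
    simp only [edgF, List.foldl_cons] at *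
    have he := hp e (by simp)
    rw [edges_regF _ _ _ _ _ he.1 he.2]
    exact ih _ (fun u hu => by
      have := hp u (by simp [hu])
      constructor <;> simp [contains_edges, this.1, this.2])

theorem regF_append (xs ys : List Int) (d : PySem.Dict Int (PySem.Dict Int Int)) :
    regF (xs ++ ys) d = regF ys (regF xs d) := by
  simp [regF, List.foldl_append]

theorem edgF_append (xs ys : List (Int × Int × Int)) (d : PySem.Dict Int (PySem.Dict Int Int)) :
    edgF (xs ++ ys) d = edgF ys (edgF xs d) := by
  simp [edgF, List.foldl_append]

-- pyGetD l (-1) skips a leading pair when the tail is nonempty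
theorem pyGetD_neg_one_cons_cons (t : List Int) (a b : Int) (h : t ≠ []) :
    PySem.List.pyGetD (a :: b :: t) (-1) 0 = PySem.List.pyGetD t (-1) 0 := by
  have ht : 1 ≤ t.length := List.length_pos_iff.mpr h
  simp [PySem.List.pyGetD, PySem.List.pyGet?, PySem.List.pyIdx?, ht]
  rw [List.getElem_cons]
  simp [List.getElem?_eq_getElem (show t.length - 1 < t.length by omega), h]

theorem drop_getD (l : List Int) (j : Nat) (h : j < l.length) :
    l.drop j = l.getD j 0 :: l.drop (j + 1) := by
  rw [List.drop_eq_getElem_cons h]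
  congr 1
  simp [List.getD_eq_getElem?_getD, List.getElem?_eq_getElem h]

theorem etrips_short (l : List Int) (h : l.length ≤ 2) : etrips l = [] := by
  rcases l with _ | ⟨a, _ | ⟨b, _ | ⟨c, t⟩⟩⟩
  · rfl
  · rfl
  · rfl
  · simp at h

-- endpoints of a list's edge triples are among its even-indexed elements
theorem etrips_sub_evens : ∀ l : List Int, ∀ t ∈ etrips l, t.1 ∈ evens l ∧ t.2.1 ∈ evens l
  | [] => by simp [etrips]
  | [a] => by simp [etrips]
  | [a, b] => by simp [etrips]
  | a :: w :: c :: t => by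
    intro u hu
    have ih := etrips_sub_evens (c :: t)
    have hev : evens (a :: w :: c :: t) = a :: evens (c :: t) := by rw [evens]
    have hc : c ∈ evens (c :: t) := by cases t <;> simp [evens]
    rw [show etrips (a :: w :: c :: t) = (a, c, w) :: etrips (c :: t) from rfl] at hu
    rcases List.mem_cons.mp hu with h | h
    · subst h; exact ⟨by simp [hev], by simp [hev, hc]⟩
    · have := ih u h
      exact ⟨by simp [hev, this.1], by simp [hev, this.2]⟩
termination_by l => l.length

-- writing an edge between two present nodes commutes with the rest of a register pass
theorem edges_regFrom (lista : List Int) (a c w : Int) (d : PySem.Dict Int (PySem.Dict Int Int))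
    (j : Nat) (ha : d.contains a = true) (hc : d.contains c = true) :
    edges a c w (regFrom lista d j) = regFrom lista (edges a c w d) j := by
  fun_induction regFrom lista d j with
  | case1 d j h ih =>
    conv_rhs => rw [regFrom]
    rw [dif_pos h, ← edges_setdefault _ _ _ _ _ ha hc]
    exact ih (by simp [contains_setdefault, ha]) (by simp [contains_setdefault, hc])
  | case2 d j h =>
    conv_rhs => rw [regFrom]
    rw [dif_neg h]

-- A's interleaved loop equals the register pass followed by the edge pass
theorem loopA_eq_passes (lista : List Int) (adj : PySem.Dict Int (PySem.Dict Int Int)) (cont : Nat) :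
    buildLoopA lista adj cont = edgeFrom lista (regFrom lista adj cont) cont := by
  have hreg : ∀ (d : PySem.Dict Int (PySem.Dict Int Int)) (a : Int),
      reg1 d a = d.setdefault a PySem.Dict.empty := fun d a => ite_contains_insert d a
  fun_induction buildLoopA lista adj cont with
  | case1 adj cont h h2 ih =>
    rw [ih, hreg, hreg]
    conv_rhs => rw [regFrom]
    rw [dif_pos h]
    conv_rhs => rw [regFrom]
    rw [dif_pos h2]
    conv_rhs => rw [edgeFrom]
    rw [dif_pos h2]
    have hca : ((adj.setdefault (lista.getD cont 0) PySem.Dict.empty).setdefault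
        (lista.getD (cont + 2) 0) PySem.Dict.empty).contains (lista.getD cont 0) = true := by
      simp [contains_setdefault]
    have hcc : ((adj.setdefault (lista.getD cont 0) PySem.Dict.empty).setdefault
        (lista.getD (cont + 2) 0) PySem.Dict.empty).contains (lista.getD (cont + 2) 0) = true := by
      simp [contains_setdefault]
    rw [edges_regFrom _ _ _ _ _ _ hca hcc]
    conv_lhs => rw [regFrom]
    rw [dif_pos h2, PySem.Dict.setdefault_of_contains (h := by simp [PySem.Dict.contains_modify]), edges]
  | case2 adj cont h h2 =>
    rw [hreg]
    conv_rhs => rw [regFrom]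
    rw [dif_pos h]
    conv_rhs => rw [regFrom]
    rw [dif_neg (by omega)]
    conv_rhs => rw [edgeFrom]
    rw [dif_neg h2]
  | case3 adj cont h =>
    conv_rhs => rw [regFrom]
    rw [dif_neg h]
    conv_rhs => rw [edgeFrom]
    rw [dif_neg (by omega)]

-- the index-based passes equal the list-based passes over evens / etrips
theorem regFrom_eq_regF (l : List Int) (d : PySem.Dict Int (PySem.Dict Int Int)) (j : Nat) :
    regFrom l d j = regF (evens (l.drop j)) d := by
  fun_induction regFrom l d j with
  | case1 d j h ih =>
    have hev : evens (l.drop j) = l.getD j 0 :: evens (l.drop (j + 2)) := by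
      rw [drop_getD l j h]
      by_cases h1 : j + 1 < l.length
      · rw [drop_getD l (j + 1) h1, show j + 1 + 1 = j + 2 from rfl, evens]
      · have e1 : l.drop (j + 1) = [] := List.drop_eq_nil_iff.mpr (by omega)
        have e2 : l.drop (j + 2) = [] := List.drop_eq_nil_iff.mpr (by omega)
        rw [e1, e2, evens, evens]
    rw [ih, hev]
    rfl
  | case2 d j h =>
    have : l.drop j = [] := List.drop_eq_nil_iff.mpr (by omega)
    rw [this]; rfl

theorem edgeFrom_eq_edgF (l : List Int) (d : PySem.Dict Int (PySem.Dict Int Int)) (j : Nat) :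
    edgeFrom l d j = edgF (etrips (l.drop j)) d := by
  fun_induction edgeFrom l d j with
  | case1 d j h ih =>
    have h1 : j + 1 < l.length := by omega
    have h0 : j < l.length := by omega
    have hd : l.drop j
        = l.getD j 0 :: l.getD (j + 1) 0 :: l.getD (j + 2) 0 :: l.drop (j + 3) := by
      rw [drop_getD l j h0, drop_getD l (j + 1) h1,
        show j + 1 + 1 = j + 2 from rfl, drop_getD l (j + 2) h]
    have hd2 : l.drop (j + 2) = l.getD (j + 2) 0 :: l.drop (j + 3) := drop_getD l (j + 2) h
    rw [ih, hd, ← hd2, show etrips (l.getD j 0 :: l.getD (j + 1) 0 :: l.drop (j + 2))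
      = (l.getD j 0, l.getD (j + 2) 0, l.getD (j + 1) 0) :: etrips (l.drop (j + 2)) by
        rw [hd2, etrips]]
    rfl
  | case2 d j h =>
    have hlen : (l.drop j).length ≤ 2 := by simp; omega
    rw [etrips_short _ hlen]
    rfl

-- A as two global passes: register all nodes of all lists, then write all edges
theorem foldA_global (rotas : List (List Int)) (d : PySem.Dict Int (PySem.Dict Int Int)) :
    rotas.foldl (fun adj lista => buildLoopA lista adj 0) d
      = edgF (rotas.flatMap etrips) (regF (rotas.flatMap evens) d) := by
  induction rotas generalizing d with
  | nil => rfl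
  | cons l rs ih =>
    rw [List.foldl_cons, ih, loopA_eq_passes, regFrom_eq_regF, edgeFrom_eq_edgF]
    simp only [List.drop_zero, List.flatMap_cons]
    rw [regF_append, edgF_append]
    congr 1
    refine (edgF_regF (etrips l) (List.flatMap evens rs) (regF (evens l) d) ?_).symm
    intro t ht
    have := etrips_sub_evens l t ht
    constructor <;> simp [contains_regF, this.1, this.2]

-- B's heads computation equals evens
theorem headsOf_eq_evens : ∀ l : List Int, headsOf l = evens l
  | [] => by simp [headsOf, chunk2, evens]
  | [a] => by
    simp [headsOf, chunk2, evens, PySem.List.pyGetD, PySem.List.pyGet?, PySem.List.pyIdx?]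
  | [a, b] => by
    simp [headsOf, chunk2, evens]
  | a :: b :: c :: t => by
    have ih := headsOf_eq_evens (c :: t)
    have hstep : headsOf (a :: b :: c :: t) = a :: headsOf (c :: t) := by
      simp only [headsOf, chunk2, List.map_cons, List.cons_append]
      congr 2
      have hm : ((a :: b :: c :: t).length % 2 == 1) = ((c :: t).length % 2 == 1) := by
        simp only [List.length_cons]
        congr 1
        omega
      rw [pyGetD_neg_one_cons_cons (c :: t) a b (by simp)]
      simp only [hm]
    rw [hstep, ih, show evens (a :: b :: c :: t) = a :: evens (c :: t) from rfl]
termination_by l => l.length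

-- B's three-way zip of heads, shifted heads and weights equals etrips
theorem zip3_tail_eq_etrips : ∀ m : List Int,
    zip3I (evens m) (evens m).tail ((chunk2 m).map Prod.snd) = etrips m
  | [] => rfl
  | [a] => rfl
  | [a, b] => rfl
  | a :: w :: c :: t => by
    have ih := zip3_tail_eq_etrips (c :: t)
    have hev : evens (a :: w :: c :: t) = a :: evens (c :: t) := rfl
    have hch : chunk2 (a :: w :: c :: t) = (a, w) :: chunk2 (c :: t) := rfl
    have hevc : ∃ r, evens (c :: t) = c :: r := by cases t <;> exact ⟨_, rfl⟩
    obtain ⟨r, hr⟩ := hevc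
    rw [hev, hch, List.map_cons, hr]
    simp only [List.tail_cons, zip3I]
    rw [show (c :: r) = evens (c :: t) from hr.symm,
      show r = (evens (c :: t)).tail by rw [hr, List.tail_cons],
      ih]
    rfl
termination_by m => m.length

theorem zip3_eq_etrips (l : List Int) :
    zip3I (evens l) (PySem.List.slice (evens l) (some 1) none) ((chunk2 l).map Prod.snd)
      = etrips l := by
  rw [PySem.List.slice_from_one]
  exact zip3_tail_eq_etrips l

-- all values of the dict built so far are empty, so the comprehension's insert
-- behaves like setdefault
def AllEmpty (d : PySem.Dict Int (PySem.Dict Int Int)) : Prop :=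
  ∀ p ∈ d.items, p.2 = PySem.Dict.empty

theorem insert_eq_setdefault_of_allEmpty (d : PySem.Dict Int (PySem.Dict Int Int)) (x : Int)
    (h : AllEmpty d) : d.insert x PySem.Dict.empty = d.setdefault x PySem.Dict.empty := by
  by_cases hc : d.contains x = true
  · rw [PySem.Dict.setdefault_of_contains (h := hc), PySem.Dict.insert, if_pos hc]
    rcases d with ⟨its⟩
    simp only [PySem.Dict.mk.injEq]
    conv_rhs => rw [← List.map_id its]
    apply List.map_congr_left
    intro p hp
    by_cases hpx : (p.1 == x) = true
    · have h2 := h p (by simpa using hp)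
      have h1 : p.1 = x := by simpa using hpx
      simp only [hpx, if_true, id_eq]
      rw [← h1, ← h2]
    · simp [hpx]
  · rw [PySem.Dict.setdefault_of_not_contains (h := by simp_all)]

theorem allEmpty_insert (d : PySem.Dict Int (PySem.Dict Int Int)) (x : Int)
    (h : AllEmpty d) : AllEmpty (d.insert x PySem.Dict.empty) := by
  intro p hp
  by_cases hc : d.contains x = true
  · rw [PySem.Dict.insert, if_pos hc] at hp
    simp only [List.mem_map] at hp
    obtain ⟨q, hq, hpq⟩ := hp
    by_cases hqx : (q.1 == x) = true
    · simp [hqx] at hpq; rw [← hpq]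
    · simp [hqx] at hpq; rw [← hpq]; exact h q hq
  · rw [PySem.Dict.insert, if_neg (by simp_all)] at hp
    rcases List.mem_append.mp hp with h1 | h1
    · exact h p h1
    · simp at h1; rw [h1]

theorem comprehension_eq_regF (ns : List Int) (d : PySem.Dict Int (PySem.Dict Int Int))
    (h : AllEmpty d) :
    ns.foldl (fun d x => d.insert x PySem.Dict.empty) d = regF ns d := by
  induction ns generalizing d with
  | nil => rfl
  | cons n t ih =>
    simp only [List.foldl_cons, regF] at *
    rw [insert_eq_setdefault_of_allEmpty d n h]
    rw [← ih (d.setdefault n PySem.Dict.empty)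
      (by rw [← insert_eq_setdefault_of_allEmpty d n h]; exact allEmpty_insert d n h)]

-- B's collecting fold produces the flattened node and edge lists
theorem collect_eq (rotas : List (List Int)) :
    rotas.foldl
      (fun (st : List Int × List (Int × Int × Int)) lista =>
        let heads := headsOf lista
        (st.1 ++ heads,
         st.2 ++ zip3I heads (PySem.List.slice heads (some 1) none) ((chunk2 lista).map Prod.snd)))
      ([], [])
      = (rotas.flatMap evens, rotas.flatMap etrips) := by
  suffices h : ∀ (ns : List Int) (es : List (Int × Int × Int)),
      rotas.foldl
        (fun (st : List Int × List (Int × Int × Int)) lista =>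
          let heads := headsOf lista
          (st.1 ++ heads,
           st.2 ++ zip3I heads (PySem.List.slice heads (some 1) none) ((chunk2 lista).map Prod.snd)))
        (ns, es)
        = (ns ++ rotas.flatMap evens, es ++ rotas.flatMap etrips) by
    simpa using h [] []
  induction rotas with
  | nil => intro ns es; simp
  | cons l rs ih =>
    intro ns es
    simp only [List.foldl_cons, List.flatMap_cons]
    rw [ih]
    rw [headsOf_eq_evens, zip3_eq_etrips]
    simp

-- ===== VERDICT (by name: the statement is the Claim_ definition above) =====
theorem build_spec : Claim_equal_build := by
  intro rotas _
  unfold Spec_build build build_alt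
  rw [foldA_global, collect_eq]
  simp only
  rw [comprehension_eq_regF _ _ (by intro p hp; simp [PySem.Dict.empty] at hp)]
  rfl
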